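-- pv_equiv track=rewrite | github.com/Grey1991/COMP9021-Python | Assignment/ass1/q1/q1.py | superpower_2
-- ===== SOURCE A (Python) =====
-- from copy import deepcopy
--
-- def superpower_2(L, n):
--     hero_list = deepcopy(L)
--     hero_list.sort()
--     for i in range(n):
--         hero_list[i] = hero_list[i] * (-1)
--         switch_hero = hero_list
--     power = sum(switch_hero)
--     return power
-- ===== SOURCE B (Python) =====
-- def superpower_2(L, n):
--     # sum(L) minus twice the sum of the n smallest elements, found by
--     # quickselect-style three-way partitioning instead of a full sort.
--     def sum_smallest(xs, k):
--         # sum of the k smallest elements of xs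
--         if k == 0:
--             return 0
--         if k == len(xs):
--             return sum(xs)
--         pivot = xs[0]
--         less = [x for x in xs if x < pivot]
--         equal = [x for x in xs if x == pivot]
--         greater = [x for x in xs if x > pivot]
--         if k <= len(less):
--             return sum_smallest(less, k)
--         if k <= len(less) + len(equal):
--             return sum(less) + pivot * (k - len(less))
--         return sum(less) + sum(equal) + sum_smallest(greater, k - len(less) - len(equal))
--     return sum(L) - 2 * sum_smallest(L, n)
-- ===== Notes on version B (the rewrite author's own statement) =====
-- stated objective: alternative
-- what changed: B replaces copy+sort+negate-loop+sum by the identity sum(L) - 2*sum(n smallest), computing the sum of the n smallest elements with quickselect-style three-way partitioning instead of sorting.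
import Mathlib
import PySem

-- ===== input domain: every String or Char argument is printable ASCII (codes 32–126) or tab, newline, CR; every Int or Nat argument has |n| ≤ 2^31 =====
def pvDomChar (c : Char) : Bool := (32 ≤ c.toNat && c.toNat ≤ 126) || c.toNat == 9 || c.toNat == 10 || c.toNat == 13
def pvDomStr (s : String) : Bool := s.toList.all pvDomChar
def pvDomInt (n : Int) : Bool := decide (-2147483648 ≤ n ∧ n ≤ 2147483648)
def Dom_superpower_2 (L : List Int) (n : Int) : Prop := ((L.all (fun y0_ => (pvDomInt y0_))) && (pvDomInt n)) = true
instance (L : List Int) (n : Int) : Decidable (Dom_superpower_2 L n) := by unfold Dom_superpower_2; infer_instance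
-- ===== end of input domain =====

-- B replaces sort + negate-loop + sum by sum(L) - 2 * (sum of the n smallest elements),
-- the latter computed by quickselect-style three-way partitioning (objective: alternative algorithm).

-- ===== PORT A =====
def superpower_2 (L : List Int) (n : Int) : Int :=
  -- hero_list = deepcopy(L); hero_list.sort()
  let hero := PySem.List.sorted L (fun x => x) false
  -- for i in range(n): hero_list[i] = hero_list[i] * (-1)  (switch_hero aliases hero_list)
  let hero := (PySem.List.pyRange 0 n 1).foldl
    (fun h i =>
      match PySem.List.pyGet? h i with
      | some v => h.set i.toNat (v * (-1))   -- i ∈ range(n) is nonneg, so .set at i.toNat is Python's h[i] = …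
      | none => h) hero                      -- Python raises IndexError here; excluded by Pre_
  hero.sum

-- ===== PORT B =====
-- sum of the k smallest elements of xs, quickselect-style (Source B's sum_smallest)
def pvSumSmallest : List Int → Int → Int
  | xs, k =>
    if k = 0 then 0
    else if k = (xs.length : Int) then xs.sum
    else
      match xs with
      | [] => 0   -- Python raises IndexError (xs[0]) here; excluded by Pre_
      | p :: t =>
        let less := (p :: t).filter (fun x => decide (x < p))
        let equal := (p :: t).filter (fun x => decide (x = p))
        let greater := (p :: t).filter (fun x => decide (p < x))
        if k ≤ (less.length : Int) then pvSumSmallest less k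
        else if k ≤ (less.length : Int) + (equal.length : Int) then
          less.sum + p * (k - (less.length : Int))
        else
          less.sum + equal.sum + pvSumSmallest greater (k - (less.length : Int) - (equal.length : Int))
termination_by xs _ => xs.length
decreasing_by
  · simp only [List.filter_cons]
    have := List.length_filter_le (fun x => decide (x < p)) t
    simp
    omega
  · simp only [List.filter_cons]
    have := List.length_filter_le (fun x => decide (p < x)) t
    simp
    omega

def superpower_2_alt (L : List Int) (n : Int) : Int :=
  L.sum - 2 * pvSumSmallest L n

-- ===== PRECONDITION & SPEC =====
-- A raises (UnboundLocalError / IndexError) unless 1 ≤ n ≤ len(L); Pre_ admits exactly the inputs where A returns.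
def Pre_superpower_2 (L : List Int) (n : Int) : Prop := 1 ≤ n ∧ n ≤ (L.length : Int)
instance (L : List Int) (n : Int) : Decidable (Pre_superpower_2 L n) := by unfold Pre_superpower_2; infer_instance

def pvWitness_superpower_2 : List Int × Int := ([3, -1, 5], 2)

def Spec_superpower_2 (L : List Int) (n : Int) (out : Int) : Prop := out = superpower_2_alt L n
instance (L : List Int) (n : Int) (out : Int) : Decidable (Spec_superpower_2 L n out) := by unfold Spec_superpower_2; infer_instance

-- ===== CLAIM (what is proved, stated in full; the proofs are below) =====
def Claim_equal_superpower_2 : Prop := ∀ (L : List Int) (n : Int), Dom_superpower_2 L n → Pre_superpower_2 L n → Spec_superpower_2 L n (superpower_2 L n)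

-- ===== LEMMAS AND PROOFS =====

theorem pvNegLoop (h : List Int) (n : Nat) (hn : n ≤ h.length) :
    (PySem.List.pyRange 0 (n : Int) 1).foldl
      (fun h i =>
        match PySem.List.pyGet? h i with
        | some v => h.set i.toNat (v * (-1))
        | none => h) h
    = (h.take n).map (fun x => -x) ++ h.drop n := by
  induction n with
  | zero => simp [PySem.List.pyRange]
  | succ m ih =>
    have hm : m ≤ h.length := Nat.le_of_succ_le hn
    have hmlt : m < h.length := hn
    have hc : ((m+1 : Nat) : Int) = (m:Int)+1 := by push_cast; ring
    rw [hc, PySem.List.pyRange_one_succ_right (by positivity), List.foldl_append, ih hm]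
    simp only [List.foldl_cons, List.foldl_nil]
    have hR : PySem.List.pyGet? ((h.take m).map (fun x => -x) ++ h.drop m) ((m:Nat):Int)
        = some (h[m]) := by
      rw [PySem.List.pyGet?_natCast]
      rw [List.getElem?_append_right (by simp [hm])]
      simp [hm, List.getElem?_drop]
    rw [hR]
    have hlen : ((h.take m).map (fun x => -x)).length = m := by simp [hm]
    have hdrop : h.drop m = h[m] :: h.drop (m+1) := List.drop_eq_getElem_cons hmlt
    have hset : ((h.take m).map (fun x => -x) ++ h.drop m).set ((m:Int)).toNat (h[m] * (-1))
        = (h.take m).map (fun x => -x) ++ ((h.drop m).set 0 (-h[m])) := by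
      rw [List.set_append_right _ _ (by omega)]
      congr 1
      congr 1
      · simp; omega
      · ring
    simp only [Int.toNat_natCast] at hset ⊢
    have htake : h.take (m+1) = h.take m ++ [h[m]] := by
      rw [List.take_succ]
      simp [List.getElem?_eq_getElem hmlt]
    rw [hset, hdrop, htake]
    simp only [List.set_cons_zero, List.map_append, List.map_cons, List.map_nil]
    simp

-- partition of xs by a pivot p ∈ xs, as a permutation
theorem pvPartPerm (xs : List Int) (p : Int) :
    (xs.filter (fun x => decide (x < p)) ++ xs.filter (fun x => decide (x = p))
      ++ xs.filter (fun x => decide (p < x))).Perm xs := by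
  have h1 := List.filter_append_perm (fun x => decide (x < p)) xs
  have h2 := List.filter_append_perm (fun x => decide (x = p)) (xs.filter (fun x => !decide (x < p)))
  rw [List.filter_filter, List.filter_filter] at h2
  have e1 : xs.filter (fun a => decide (a = p) && !decide (a < p)) = xs.filter (fun x => decide (x = p)) := by
    apply List.filter_congr
    intro x _
    by_cases hx : x = p <;> simp [hx] <;> omega
  have e2 : xs.filter (fun a => !decide (a = p) && !decide (a < p)) = xs.filter (fun x => decide (p < x)) := by
    apply List.filter_congr
    intro x _
    by_cases hx : p < x <;> simp [hx] <;> omega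
  rw [e1, e2] at h2
  have e3 : (xs.filter (fun x => decide (x < p)) ++ xs.filter (fun x => decide (x = p))
      ++ xs.filter (fun x => decide (p < x)))
      = xs.filter (fun x => decide (x < p)) ++ (xs.filter (fun x => decide (x = p))
      ++ xs.filter (fun x => decide (p < x))) := by simp
  rw [e3]
  exact (List.Perm.append_left _ h2).trans h1

-- the sorted list decomposes along the pivot partition
theorem pvSortedDecomp (xs : List Int) (p : Int) :
    PySem.List.sorted xs (fun x => x) false
      = PySem.List.sorted (xs.filter (fun x => decide (x < p))) (fun x => x) false
        ++ xs.filter (fun x => decide (x = p))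
        ++ PySem.List.sorted (xs.filter (fun x => decide (p < x))) (fun x => x) false := by
  apply PySem.List.sorted_id_eq_of_perm_of_pairwise
  · refine List.Perm.trans ?_ (pvPartPerm xs p)
    refine List.Perm.append (List.Perm.append ?_ (List.Perm.refl _)) ?_ <;>
      exact PySem.List.sorted_perm _ _ _
  · rw [List.pairwise_append, List.pairwise_append]
    refine ⟨⟨PySem.List.sorted_pairwise _ _, ?_, ?_⟩, PySem.List.sorted_pairwise _ _, ?_⟩
    · exact List.pairwise_of_forall_mem_list (fun a ha b hb => by
        simp at ha hb; omega)
    · intro a ha b hb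
      rw [PySem.List.mem_sorted] at ha
      simp at ha hb
      omega
    · intro a ha b hb
      rw [List.mem_append] at ha
      rw [PySem.List.mem_sorted] at hb
      rcases ha with ha | ha
      · rw [PySem.List.mem_sorted] at ha
        simp at ha hb; omega
      · simp at ha hb; omega

theorem pvSumSmallestAux : ∀ (N : Nat) (xs : List Int), xs.length ≤ N → ∀ (k : Int), 0 ≤ k → k ≤ (xs.length : Int) →
    pvSumSmallest xs k = ((PySem.List.sorted xs (fun x => x) false).take k.toNat).sum := by
  intro N
  induction N with
  | zero =>
    intro xs hlen k hk hk2
    have hx : xs = [] := List.eq_nil_of_length_eq_zero (Nat.le_zero.mp hlen)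
    subst hx
    have : k = 0 := by simp at hk2; omega
    subst this
    rw [pvSumSmallest.eq_def]; simp
  | succ M IH =>
    intro xs hlen k hk hk2
    cases xs with
    | nil =>
      have hk0 : k = 0 := by simp at hk2; omega
      subst hk0
      rw [pvSumSmallest.eq_def]; simp
    | cons p t =>
      rw [pvSumSmallest.eq_def]
      dsimp only
      by_cases hk0 : k = 0
      · subst hk0; simp
      rw [if_neg hk0]
      by_cases hkl : k = ((p :: t).length : Int)
      · rw [if_pos hkl, hkl]
        have hlensorted : (PySem.List.sorted (p :: t) (fun x => x) false).length = (p :: t).length :=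
          PySem.List.length_sorted _ _ _
        rw [Int.toNat_natCast, ← hlensorted, List.take_length]
        exact ((PySem.List.sorted_perm (p :: t) (fun x => x) false).sum_eq).symm
      rw [if_neg hkl]
      set less := (p :: t).filter (fun x => decide (x < p)) with hless
      set equal := (p :: t).filter (fun x => decide (x = p)) with hequal
      set greater := (p :: t).filter (fun x => decide (p < x)) with hgreater
      have hlenpart : less.length + equal.length + greater.length = (p :: t).length := by
        have h := (pvPartPerm (p :: t) p).length_eq
        rw [← hless, ← hequal, ← hgreater] at h
        simp only [List.length_append] at h
        simp only [List.length_cons] at h ⊢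
        omega
      simp only [List.length_cons] at hlen hk2 hkl hlenpart
      have hlessle : less.length ≤ t.length := by
        rw [hless, List.filter_cons]
        simp only [decide_eq_true_eq, lt_irrefl]
        simpa using List.length_filter_le _ t
      have hgreaterle : greater.length ≤ t.length := by
        rw [hgreater, List.filter_cons]
        simp only [decide_eq_true_eq, lt_irrefl]
        simpa using List.length_filter_le _ t
      have hdec := pvSortedDecomp (p :: t) p
      rw [← hless, ← hequal, ← hgreater] at hdec
      rw [hdec]
      have hlenA : (PySem.List.sorted less (fun x => x) false).length = less.length :=
        PySem.List.length_sorted _ _ _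
      have hlenC : (PySem.List.sorted greater (fun x => x) false).length = greater.length :=
        PySem.List.length_sorted _ _ _
      have hArep : equal = List.replicate equal.length p := by
        apply List.eq_replicate_of_mem
        intro b hb
        rw [hequal] at hb
        simp at hb
        tauto
      by_cases h1 : k ≤ (less.length : Int)
      · rw [if_pos h1]
        rw [List.take_append_of_le_length (by simp [hlenA]; omega),
            List.take_append_of_le_length (by rw [hlenA]; omega)]
        exact IH less (by omega) k hk (by omega)
      rw [if_neg h1]
      rw [List.take_append, List.take_append,
          List.take_of_length_le (by rw [hlenA]; omega)]
      by_cases h2 : k ≤ (less.length : Int) + (equal.length : Int)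
      · rw [if_pos h2]
        have hc0 : k.toNat - ((PySem.List.sorted less (fun x => x) false) ++ equal).length = 0 := by
          simp [hlenA]; omega
        rw [hc0, List.take_zero, hlenA]
        rw [hArep, List.take_replicate]
        have hmin : min (k.toNat - less.length) equal.length = k.toNat - less.length := by omega
        rw [hmin]
        simp only [List.append_nil, List.sum_append, List.sum_replicate]
        rw [(PySem.List.sorted_perm less (fun x => x) false).sum_eq]
        have hcast : ((k.toNat - less.length : Nat) : Int) = k - (less.length : Int) := by omega
        rw [nsmul_eq_mul, hcast]
        ring
      rw [if_neg h2]
      have hIH := IH greater (by omega) (k - (less.length : Int) - (equal.length : Int))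
        (by omega) (by omega)
      rw [List.take_of_length_le (by rw [hArep]; simp [hlenA]; omega)]
      simp only [List.sum_append]
      rw [(PySem.List.sorted_perm less (fun x => x) false).sum_eq, hIH]
      have hcast : (k - (less.length : Int) - (equal.length : Int)).toNat
          = k.toNat - ((PySem.List.sorted less (fun x => x) false) ++ equal).length := by
        simp [hlenA]; omega
      rw [← hcast]

-- ===== VERDICT (by name: the statement is the Claim_ definition above) =====
theorem superpower_2_spec : Claim_equal_superpower_2 := by
  intro L n _ hpre
  obtain ⟨h1, h2⟩ := hpre
  show superpower_2 L n = superpower_2_alt L n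
  have goalshape : superpower_2 L n = ((PySem.List.pyRange 0 n 1).foldl
      (fun h i =>
        match PySem.List.pyGet? h i with
        | some v => h.set i.toNat (v * (-1))
        | none => h) (PySem.List.sorted L (fun x => x) false)).sum := rfl
  rw [goalshape]
  show _ = L.sum - 2 * pvSumSmallest L n
  have hn : ((n.toNat : Nat) : Int) = n := by omega
  have hlenS : (PySem.List.sorted L (fun x => x) false).length = L.length :=
    PySem.List.length_sorted _ _ _
  have hnle : n.toNat ≤ (PySem.List.sorted L (fun x => x) false).length := by
    rw [hlenS]; omega
  rw [← hn, pvNegLoop _ _ hnle]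
  rw [pvSumSmallestAux L.length L le_rfl ((n.toNat : Nat) : Int) (by omega) (by omega)]
  simp only [Int.toNat_natCast]
  have hsplit := List.sum_take_add_sum_drop (PySem.List.sorted L (fun x => x) false) n.toNat
  have hperm := (PySem.List.sorted_perm L (fun x => x) false).sum_eq
  rw [List.sum_append]
  have hmapneg : (((PySem.List.sorted L (fun x => x) false).take n.toNat).map (fun x => -x)).sum
      = -((PySem.List.sorted L (fun x => x) false).take n.toNat).sum :=
    Eq.symm (List.sum_neg _)
  rw [hmapneg, ← hperm, ← hsplit]
  ring
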